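-- pv_equiv track=rewrite | github.com/stephenseacuello/lego-mcp-fusion360 | dashboard/services/scheduling/nsga2_scheduler.py | _ox_crossover
-- ===== SOURCE A (Python) =====
-- from typing import Any, Dict, List, Optional, Tuple
--
-- def _ox_crossover(parent1: List, parent2: List, cx1: int, cx2: int) -> List:
--     """Order crossover helper."""
--     size = len(parent1)
--     child = [None] * size
--
--     # Copy segment from parent1
--     child[cx1:cx2] = parent1[cx1:cx2]
--     copied = set(parent1[cx1:cx2])
--
--     # Fill remaining from parent2 in order
--     pos = cx2
--     for i in range(size):
--         idx = (cx2 + i) % size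
--         gene = parent2[idx]
--         if gene not in copied:
--             while child[pos % size] is not None:
--                 pos += 1
--             child[pos % size] = gene
--             pos += 1
--
--     return child
-- ===== SOURCE B (Python) =====
-- def _ox_crossover(parent1, parent2, cx1, cx2):
--     """Order crossover: purely functional construction (no child mutation) —
--     compute the slot->gene mapping arithmetically and build the child in one
--     comprehension over range(size)."""
--     size = len(parent1)
--     if size == 0:
--         return []
--     lo, hi, _ = slice(cx1, cx2).indices(size)
--     hi = max(lo, hi)
--     copied = set(parent1[lo:hi])
--     start = cx2 % size
--     # parent2's genes in wrap order starting at start, via rotation by slicing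
--     rotated = parent2[start:size] + parent2[:start]
--     genes = [g for g in rotated if g not in copied]
--     # the empty slots (indices outside [lo, hi)) in the same wrap order
--     slots = [i for i in range(start, size) if not lo <= i < hi] \
--           + [i for i in range(start) if not lo <= i < hi]
--     fill = dict(zip(slots, genes))
--     return [parent1[i] if lo <= i < hi else fill.get(i) for i in range(size)]
-- ===== Notes on version B (the rewrite author's own statement) =====
-- stated objective: alternative
-- what changed: A mutates a [None]*size child in place, filling slots through an advancing pos pointer with an inner while-scan; B never mutates a child at all: it computes the slot-to-gene mapping arithmetically (rotated parent2 filtered, empty slot indices from the clamped segment bounds, dict(zip(...))) and builds the child in one comprehension over range(size).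
import Mathlib
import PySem

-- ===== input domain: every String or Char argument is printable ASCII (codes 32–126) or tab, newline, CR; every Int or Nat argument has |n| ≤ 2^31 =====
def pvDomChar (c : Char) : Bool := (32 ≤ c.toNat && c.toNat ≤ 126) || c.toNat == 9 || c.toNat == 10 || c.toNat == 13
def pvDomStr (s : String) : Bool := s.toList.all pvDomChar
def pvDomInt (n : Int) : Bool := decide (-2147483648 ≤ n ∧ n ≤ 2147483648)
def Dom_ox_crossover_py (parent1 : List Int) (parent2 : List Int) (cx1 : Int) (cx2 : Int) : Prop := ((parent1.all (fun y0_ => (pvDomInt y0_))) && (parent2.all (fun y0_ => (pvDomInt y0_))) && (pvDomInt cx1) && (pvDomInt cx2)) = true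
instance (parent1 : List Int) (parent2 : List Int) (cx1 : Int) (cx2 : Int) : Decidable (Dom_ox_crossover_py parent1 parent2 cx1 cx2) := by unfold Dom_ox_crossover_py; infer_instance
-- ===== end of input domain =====

-- B replaces A's in-place fill loop (a [None]*size child mutated via an advancing `pos` pointer
-- with an inner while-scan) by a purely functional construction: the slot→gene mapping is
-- computed arithmetically (a dict from the rotated parents), and the child is built in one
-- comprehension over range(size) — no child array is ever mutated.

-- ===== PORT A =====

-- `child = [None]*size; child[cx1:cx2] = parent1[cx1:cx2]`: Python slice assignment replaces the
-- positions [clampIdx size cx1, max (clampIdx size cx1) (clampIdx size cx2)) of the all-None list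
-- by the segment (both slices have the same bounds, hence equal length); exact Python semantics.
def oxInitChild (parent1 : List Int) (cx1 : Int) (cx2 : Int) : List (Option Int) :=
  let n := parent1.length
  let lo := PySem.List.clampIdx n cx1
  let hi := PySem.List.clampIdx n cx2
  let seg := PySem.List.slice parent1 (some cx1) (some cx2)
  (List.replicate lo (none : Option Int) ++ seg.map some) ++ List.replicate (n - max lo hi) (none : Option Int)

-- Python `while child[pos % size] is not None: pos += 1`, probed with fuel = size (one full cycle
-- of residues): exact wherever the Python loop terminates (Pre_ excludes the inputs on which the
-- Python while-loop never does).
def oxSearch (child : List (Option Int)) (size : Int) (pos : Int) : Nat → Int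
  | 0 => pos
  | fuel+1 =>
    match PySem.List.pyGet? child (PySem.Int.mod pos size) with
    | some (some _) => oxSearch child size (pos + 1) fuel
    | _ => pos

-- one iteration of A's `for i in range(size)` loop, state = (child, pos)
def oxStepA (parent2 : List Int) (size : Int) (cx2 : Int) (copied : List Int)
    (st : List (Option Int) × Int) (i : Int) : List (Option Int) × Int :=
  let idx := PySem.Int.mod (cx2 + i) size
  -- parent2[idx]: Python raises IndexError when idx is out of range — Pre_ excludes that
  let gene := PySem.List.pyGetD parent2 idx 0
  if gene ∈ copied then st
  else
    let p := oxSearch st.1 size st.2 size.toNat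
    (st.1.set (PySem.Int.mod p size).toNat (some gene), p + 1)

def ox_crossover_py (parent1 : List Int) (parent2 : List Int) (cx1 : Int) (cx2 : Int) : List (Option Int) :=
  let size : Int := parent1.length
  let child := oxInitChild parent1 cx1 cx2
  let copied := PySem.Set.ofList (PySem.List.slice parent1 (some cx1) (some cx2))
  ((PySem.List.pyRange 0 size 1).foldl (oxStepA parent2 size cx2 copied) (child, cx2)).1

-- ===== PORT B =====

def ox_crossover_py_alt (parent1 : List Int) (parent2 : List Int) (cx1 : Int) (cx2 : Int) : List (Option Int) :=
  let size := parent1.length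
  if size = 0 then []  -- Source B: `if size == 0: return []`
  else
    -- `lo, hi, _ = slice(cx1, cx2).indices(size); hi = max(lo, hi)`: slice.indices clamps exactly
    -- as slicing does (PySem.List.clampIdx)
    let lo := PySem.List.clampIdx size cx1
    let hi := max lo (PySem.List.clampIdx size cx2)
    -- `copied = set(parent1[lo:hi])` with 0 ≤ lo ≤ hi ≤ size natural bounds
    let copied := PySem.Set.ofList ((parent1.drop lo).take (hi - lo))
    let start := (PySem.Int.mod cx2 (size : Int)).toNat
    -- `rotated = parent2[start:size] + parent2[:start]` (natural bounds, as drop/take)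
    let rotated := (parent2.drop start).take (size - start) ++ parent2.take start
    let genes := rotated.filter (fun g => !decide (g ∈ copied))
    -- `slots = [i for i in range(start, size) if not lo <= i < hi] + [i for i in range(start) …]`
    let slots := (List.range' start (size - start)).filter (fun i => !(decide (lo ≤ i) && decide (i < hi)))
              ++ (List.range start).filter (fun i => !(decide (lo ≤ i) && decide (i < hi)))
    -- `fill = dict(zip(slots, genes))`
    let fill := PySem.Dict.ofList (slots.zip genes)
    -- `[parent1[i] if lo <= i < hi else fill.get(i) for i in range(size)]`
    -- (parent1[i]: i < size = len(parent1), always in range, so getD's default is never read)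
    (List.range size).map (fun i => if lo ≤ i ∧ i < hi then some (parent1.getD i 0) else fill.get? i)

-- ===== PRECONDITION & SPEC =====

-- Pre_ is exactly the set of inputs on which the Python A returns: it excludes
-- (a) len(parent2) < len(parent1), where A's loop raises IndexError on parent2[idx], and
-- (b) inputs where parent2 carries more genes outside the copied segment than there are empty
--     slots, where A's inner `while child[pos % size] is not None` loop never terminates.
def Pre_ox_crossover_py (parent1 : List Int) (parent2 : List Int) (cx1 : Int) (cx2 : Int) : Prop :=
  parent1.length ≤ parent2.length ∧
  (List.range parent1.length).countP
      (fun i => decide (parent2.getD i 0 ∉ PySem.List.slice parent1 (some cx1) (some cx2)))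
    ≤ parent1.length - (PySem.List.slice parent1 (some cx1) (some cx2)).length

instance (parent1 : List Int) (parent2 : List Int) (cx1 : Int) (cx2 : Int) : Decidable (Pre_ox_crossover_py parent1 parent2 cx1 cx2) := by unfold Pre_ox_crossover_py; infer_instance

def pvWitness_ox_crossover_py : List Int × List Int × Int × Int := ([1, 2, 3, 4], [4, 3, 2, 1], 1, 3)

def Spec_ox_crossover_py (parent1 : List Int) (parent2 : List Int) (cx1 : Int) (cx2 : Int) (out : List (Option Int)) : Prop := out = ox_crossover_py_alt parent1 parent2 cx1 cx2
instance (parent1 : List Int) (parent2 : List Int) (cx1 : Int) (cx2 : Int) (out : List (Option Int)) : Decidable (Spec_ox_crossover_py parent1 parent2 cx1 cx2 out) := by unfold Spec_ox_crossover_py; infer_instance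

-- ===== CLAIM (what is proved, stated in full; the proofs are below) =====
def Claim_equal_ox_crossover_py : Prop := ∀ (parent1 : List Int) (parent2 : List Int) (cx1 : Int) (cx2 : Int), Dom_ox_crossover_py parent1 parent2 cx1 cx2 → Pre_ox_crossover_py parent1 parent2 cx1 cx2 → Spec_ox_crossover_py parent1 parent2 cx1 cx2 (ox_crossover_py parent1 parent2 cx1 cx2)

-- ===== LEMMAS AND PROOFS =====

-- Proof-side views of A's loop, indexed by the OFFSET k (list position (cx2+k) % n):
-- oxR is the real index behind offset k, oxG the parent2 gene there, oxFull/oxEmp the slot tests,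
-- oxSearchN A's while-pointer on offsets, oxStepN A's loop body on offset state, oxRem/oxZip the
-- intermediate 'ordered genes zipped onto ordered empty offsets' form both ports are reduced to.

def oxR (cx2 : Int) (n : Nat) (k : Nat) : Nat := (PySem.Int.mod (cx2 + k) n).toNat

def oxG (p2 : List Int) (cx2 : Int) (n : Nat) (k : Nat) : Int :=
  PySem.List.pyGetD p2 (PySem.Int.mod (cx2 + k) n) 0

def oxFull (cx2 : Int) (n : Nat) (c : List (Option Int)) (q : Nat) : Bool :=
  getElem? c (oxR cx2 n q) != some none

def oxEmp (cx2 : Int) (n : Nat) (c : List (Option Int)) : List Nat :=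
  (List.range n).filter (fun e => !oxFull cx2 n c e)

def oxSearchN (cx2 : Int) (n : Nat) (c : List (Option Int)) (p : Nat) : Nat → Nat
  | 0 => p
  | fuel+1 => if oxFull cx2 n c p then oxSearchN cx2 n c (p + 1) fuel else p

def oxStepN (p2 : List Int) (cx2 : Int) (n : Nat) (copied : List Int)
    (st : List (Option Int) × Nat) (k : Nat) : List (Option Int) × Nat :=
  if oxG p2 cx2 n k ∈ copied then st
  else
    let p := oxSearchN cx2 n st.1 st.2 n
    (st.1.set (oxR cx2 n p) (some (oxG p2 cx2 n k)), p + 1)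

def oxRem (p2 : List Int) (cx2 : Int) (n : Nat) (copied : List Int) (js : List Nat) : List Int :=
  js.filterMap (fun k => if oxG p2 cx2 n k ∈ copied then none else some (oxG p2 cx2 n k))

def oxZip (cx2 : Int) (n : Nat) (c : List (Option Int)) (es : List Nat) (gs : List Int) : List (Option Int) :=
  (es.zip gs).foldl (fun c pr => c.set (oxR cx2 n pr.1) (some pr.2)) c

theorem oxR_lt (cx2 : Int) {n : Nat} (hn : 0 < n) (k : Nat) : oxR cx2 n k < n := by
  have h1 := PySem.Int.mod_nonneg (cx2 + k) (b := (n : Int)) (by exact_mod_cast hn)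
  have h2 := PySem.Int.mod_lt (cx2 + k) (b := (n : Int)) (by exact_mod_cast hn)
  unfold oxR; omega

theorem oxR_cast (cx2 : Int) {n : Nat} (hn : 0 < n) (k : Nat) :
    ((oxR cx2 n k : Nat) : Int) = PySem.Int.mod (cx2 + k) n := by
  have h1 := PySem.Int.mod_nonneg (cx2 + k) (b := (n : Int)) (by exact_mod_cast hn)
  unfold oxR; omega

theorem oxR_inj (cx2 : Int) {n : Nat} (hn : 0 < n) {a b : Nat} (ha : a < n) (hb : b < n)
    (h : oxR cx2 n a = oxR cx2 n b) : a = b := by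
  have hn' : (0 : Int) < n := by exact_mod_cast hn
  have h1 := PySem.Int.mod_nonneg (cx2 + a) hn'
  have h2 := PySem.Int.mod_nonneg (cx2 + b) hn'
  have hm : PySem.Int.mod (cx2 + a) n = PySem.Int.mod (cx2 + b) n := by
    unfold oxR at h; omega
  rw [PySem.Int.mod_eq_emod_of_pos hn', PySem.Int.mod_eq_emod_of_pos hn'] at hm
  have hdvd : (n : Int) ∣ (cx2 + b) - (cx2 + a) := Int.ModEq.dvd hm
  have : ((cx2 + b) - (cx2 + a)) = (b : Int) - a := by ring
  rw [this] at hdvd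
  have habs : |(b : Int) - a| < n := by
    rw [abs_lt]; constructor <;> [push_cast; push_cast] <;> omega
  have := Int.eq_zero_of_abs_lt_dvd hdvd habs
  omega

theorem ox_lookup {n : Nat} (hn : 0 < n) (c : List (Option Int)) (x : Int) :
    PySem.List.pyGet? c (PySem.Int.mod x n) = getElem? c (PySem.Int.mod x n).toNat := by
  have h1 := PySem.Int.mod_nonneg x (b := (n : Int)) (by exact_mod_cast hn)
  conv_lhs => rw [← Int.toNat_of_nonneg h1]
  rw [PySem.List.pyGet?_natCast]

theorem oxSearch_bridge (cx2 : Int) {n : Nat} (hn : 0 < n) (c : List (Option Int))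
    (hc : c.length = n) : ∀ (fuel p : Nat),
    oxSearch c n (cx2 + p) fuel = cx2 + oxSearchN cx2 n c p fuel := by
  intro fuel
  induction fuel with
  | zero => intro p; simp [oxSearch, oxSearchN]
  | succ fuel ih =>
    intro p
    have hr : oxR cx2 n p < c.length := hc ▸ oxR_lt cx2 hn p
    obtain ⟨v, hv⟩ : ∃ v, getElem? c (oxR cx2 n p) = some v :=
      ⟨_, List.getElem?_eq_getElem hr⟩
    show oxSearch c n (cx2 + p) (fuel + 1) = _
    rw [oxSearch, ox_lookup hn]
    show (match getElem? c (oxR cx2 n p) with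
      | some (some _) => oxSearch c n (cx2 + p + 1) fuel
      | _ => cx2 + p) = _
    rw [oxSearchN]
    cases v with
    | none =>
      rw [hv]
      have : oxFull cx2 n c p = false := by simp [oxFull, hv]
      simp [this]
    | some g =>
      rw [hv]
      have : oxFull cx2 n c p = true := by simp [oxFull, hv]
      rw [this]
      simp only [if_true]
      have : cx2 + (p : Int) + 1 = cx2 + ((p + 1 : Nat) : Int) := by push_cast; ring
      rw [this, ih (p + 1)]

theorem oxSearchN_spec (cx2 : Int) {n : Nat} (c : List (Option Int)) {e : Nat} :
    ∀ (fuel p : Nat), p ≤ e → e < p + fuel →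
    (∀ q, p ≤ q → q < e → oxFull cx2 n c q = true) → oxFull cx2 n c e = false →
    oxSearchN cx2 n c p fuel = e := by
  intro fuel
  induction fuel with
  | zero => intro p h1 h2 _ _; omega
  | succ fuel ih =>
    intro p h1 h2 hmid he
    rw [oxSearchN]
    rcases Nat.eq_or_lt_of_le h1 with rfl | hlt
    · simp [he]
    · rw [hmid p le_rfl hlt]
      simp only [if_true]
      exact ih (p + 1) hlt (by omega) (fun q hq hq' => hmid q (by omega) hq') he

theorem oxEmp_head (cx2 : Int) {n : Nat} {c : List (Option Int)} {e : Nat} {tl : List Nat}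
    (h : oxEmp cx2 n c = e :: tl) :
    e < n ∧ oxFull cx2 n c e = false ∧ (∀ q, q < e → oxFull cx2 n c q = true) := by
  have hmem : e ∈ oxEmp cx2 n c := by rw [h]; exact List.mem_cons_self
  have hmem' := List.mem_filter.mp hmem
  have he : e < n := List.mem_range.mp hmem'.1
  have hfe : oxFull cx2 n c e = false := by
    have := hmem'.2; simpa using this
  refine ⟨he, hfe, fun q hq => ?_⟩
  by_contra hq'
  have hqf : oxFull cx2 n c q = false := by
    cases hx : oxFull cx2 n c q
    · rfl
    · exact absurd hx hq'
  have hqmem : q ∈ oxEmp cx2 n c := by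
    apply List.mem_filter.mpr
    exact ⟨List.mem_range.mpr (by omega), by simp [hqf]⟩
  have hpw : (oxEmp cx2 n c).Pairwise (· < ·) := List.Pairwise.filter _ List.pairwise_lt_range
  rw [h] at hqmem hpw
  rcases List.mem_cons.mp hqmem with rfl | hq2
  · omega
  · have := (List.pairwise_cons.mp hpw).1 q hq2; omega

theorem oxEmp_set (cx2 : Int) {n : Nat} (hn : 0 < n) {c : List (Option Int)} (hc : c.length = n)
    {e : Nat} {tl : List Nat} (h : oxEmp cx2 n c = e :: tl) (g : Int) :
    oxEmp cx2 n (c.set (oxR cx2 n e) (some g)) = tl := by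
  obtain ⟨he, _, _⟩ := oxEmp_head cx2 h
  have hstep : ∀ q ∈ List.range n,
      (!oxFull cx2 n (c.set (oxR cx2 n e) (some g)) q) = (decide (q ≠ e) && !oxFull cx2 n c q) := by
    intro q hq
    have hqn : q < n := List.mem_range.mp hq
    by_cases hqe : q = e
    · subst hqe
      have : getElem? (c.set (oxR cx2 n q) (some g)) (oxR cx2 n q) = some (some g) :=
        List.getElem?_set_self (by rw [hc]; exact oxR_lt cx2 hn q)
      simp [oxFull, this]
    · have hne : oxR cx2 n e ≠ oxR cx2 n q := fun hx => hqe (oxR_inj cx2 hn hqn he hx.symm)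
      have : getElem? (c.set (oxR cx2 n e) (some g)) (oxR cx2 n q) = getElem? c (oxR cx2 n q) :=
        List.getElem?_set_ne hne
      simp [oxFull, this, hqe]
  have h1 : oxEmp cx2 n (c.set (oxR cx2 n e) (some g))
      = (List.range n).filter (fun q => decide (q ≠ e) && !oxFull cx2 n c q) := by
    unfold oxEmp
    exact List.filter_congr hstep
  rw [h1]
  have h2 : (List.range n).filter (fun q => decide (q ≠ e) && !oxFull cx2 n c q)
      = ((List.range n).filter (fun q => !oxFull cx2 n c q)).filter (fun q => decide (q ≠ e)) := by
    rw [List.filter_filter]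
  rw [h2]
  show (oxEmp cx2 n c).filter (fun q => decide (q ≠ e)) = tl
  rw [h]
  have hpw : (oxEmp cx2 n c).Pairwise (· < ·) := List.Pairwise.filter _ List.pairwise_lt_range
  rw [h] at hpw
  have htl : ∀ q ∈ tl, e < q := (List.pairwise_cons.mp hpw).1
  rw [List.filter_cons]
  have hee : (decide (e ≠ e)) = false := by simp
  rw [hee]
  simp only [Bool.false_eq_true, if_false]
  apply List.filter_eq_self.mpr
  intro q hq
  have := htl q hq
  simp only [ne_eq, decide_eq_true_eq]
  omega

theorem ox_main (p2 : List Int) (cx2 : Int) {n : Nat} (hn : 0 < n) (copied : List Int) :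
    ∀ (js : List Nat) (c : List (Option Int)) (p : Nat), c.length = n →
    (∀ q, q < p → oxFull cx2 n c q = true) →
    js.countP (fun k => !decide (oxG p2 cx2 n k ∈ copied)) ≤ (oxEmp cx2 n c).length →
    (js.foldl (oxStepN p2 cx2 n copied) (c, p)).1
      = oxZip cx2 n c (oxEmp cx2 n c) (oxRem p2 cx2 n copied js) := by
  intro js
  induction js with
  | nil => intro c p _ _ _; simp [oxRem, oxZip, List.zip_nil_right]
  | cons k js ih =>
    intro c p hc h1 hcnt
    by_cases hg : oxG p2 cx2 n k ∈ copied
    · rw [List.foldl_cons]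
      have hstep : oxStepN p2 cx2 n copied (c, p) k = (c, p) := by simp [oxStepN, hg]
      rw [hstep]
      have hrem : oxRem p2 cx2 n copied (k :: js) = oxRem p2 cx2 n copied js := by
        simp [oxRem, hg]
      rw [hrem]
      apply ih c p hc h1
      calc js.countP (fun k => !decide (oxG p2 cx2 n k ∈ copied))
          ≤ (k :: js).countP (fun k => !decide (oxG p2 cx2 n k ∈ copied)) := by
            rw [List.countP_cons]; omega
        _ ≤ (oxEmp cx2 n c).length := hcnt
    · -- there is an empty slot
      have hcnt1 : 1 ≤ (oxEmp cx2 n c).length := by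
        have : (k :: js).countP (fun k => !decide (oxG p2 cx2 n k ∈ copied))
            = js.countP (fun k => !decide (oxG p2 cx2 n k ∈ copied)) + 1 :=
          List.countP_cons_of_pos (by simp [hg])
        omega
      obtain ⟨e, tl, hemp⟩ : ∃ e tl, oxEmp cx2 n c = e :: tl := by
        cases hx : oxEmp cx2 n c with
        | nil => rw [hx] at hcnt1; simp at hcnt1
        | cons e tl => exact ⟨e, tl, rfl⟩
      obtain ⟨he, hfe, hmin⟩ := oxEmp_head cx2 hemp
      have hpe : p ≤ e := by
        by_contra hx
        have := h1 e (by omega)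
        rw [this] at hfe; exact Bool.noConfusion hfe
      have hsearch : oxSearchN cx2 n c p n = e :=
        oxSearchN_spec cx2 c n p hpe (by omega)
          (fun q hq hq' => hmin q hq') hfe
      rw [List.foldl_cons]
      have hstep : oxStepN p2 cx2 n copied (c, p) k
          = (c.set (oxR cx2 n e) (some (oxG p2 cx2 n k)), e + 1) := by
        simp only [oxStepN, if_neg hg]
        simp [hsearch]
      rw [hstep]
      set c' := c.set (oxR cx2 n e) (some (oxG p2 cx2 n k)) with hcdef
      have hc' : c'.length = n := by rw [hcdef, List.length_set]; exact hc
      have hemp' : oxEmp cx2 n c' = tl := oxEmp_set cx2 hn hc hemp _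
      have h1' : ∀ q, q < e + 1 → oxFull cx2 n c' q = true := by
        intro q hq
        by_cases hqe : q = e
        · subst hqe
          have : getElem? c' (oxR cx2 n q) = some (some (oxG p2 cx2 n k)) :=
            List.getElem?_set_self (by rw [hc]; exact oxR_lt cx2 hn q)
          simp [oxFull, this]
        · have hqn : q < n := by omega
          have hne : oxR cx2 n e ≠ oxR cx2 n q := fun hx => hqe (oxR_inj cx2 hn hqn he hx.symm)
          have hsame : getElem? c' (oxR cx2 n q) = getElem? c (oxR cx2 n q) :=
            List.getElem?_set_ne hne
          have hfq : oxFull cx2 n c q = true := by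
            by_cases hqp : q < p
            · exact h1 q hqp
            · exact hmin q (by omega)
          unfold oxFull at hfq ⊢
          rw [hsame]; exact hfq
      have hcnt' : js.countP (fun k => !decide (oxG p2 cx2 n k ∈ copied))
          ≤ (oxEmp cx2 n c').length := by
        rw [hemp']
        have : (k :: js).countP (fun k => !decide (oxG p2 cx2 n k ∈ copied))
            = js.countP (fun k => !decide (oxG p2 cx2 n k ∈ copied)) + 1 :=
          List.countP_cons_of_pos (by simp [hg])
        rw [hemp] at hcnt
        simp only [List.length_cons] at hcnt
        omega
      have hrem : oxRem p2 cx2 n copied (k :: js)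
          = oxG p2 cx2 n k :: oxRem p2 cx2 n copied js := by
        simp [oxRem, hg]
      rw [hrem, hemp]
      show (js.foldl (oxStepN p2 cx2 n copied) (c', e + 1)).1 = oxZip cx2 n c (e :: tl) _
      have hz : oxZip cx2 n c (e :: tl) (oxG p2 cx2 n k :: oxRem p2 cx2 n copied js)
          = oxZip cx2 n c' tl (oxRem p2 cx2 n copied js) := by
        simp [oxZip, hcdef]
      rw [hz, ← hemp']
      exact ih c' (e + 1) hc' h1' hcnt'

-- A's loop body on Int state equals the offset-state body
theorem oxStepA_bridge (p2 : List Int) (cx2 : Int) {n : Nat} (hn : 0 < n) (copied : List Int)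
    (c : List (Option Int)) (hc : c.length = n) (p k : Nat) :
    oxStepA p2 (n : Int) cx2 copied (c, cx2 + (p : Int)) (k : Int)
      = ((oxStepN p2 cx2 n copied (c, p) k).1,
         cx2 + ((oxStepN p2 cx2 n copied (c, p) k).2 : Int)) := by
  by_cases hg : oxG p2 cx2 n k ∈ copied
  · have hg' : PySem.List.pyGetD p2 (PySem.Int.mod (cx2 + (k : Int)) (n : Int)) 0 ∈ copied := hg
    simp only [oxStepA, oxStepN]
    rw [if_pos hg', if_pos hg]
  · have hg' : PySem.List.pyGetD p2 (PySem.Int.mod (cx2 + (k : Int)) (n : Int)) 0 ∉ copied := hg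
    simp only [oxStepA, oxStepN]
    rw [if_neg hg', if_neg hg]
    have hsb : oxSearch c ((n : Int)) (cx2 + (p : Int)) ((n : Int)).toNat
        = cx2 + (oxSearchN cx2 n c p n : Int) := by
      rw [Int.toNat_natCast]; exact oxSearch_bridge cx2 hn c hc n p
    simp only [hsb]
    refine congrArg₂ Prod.mk ?_ ?_
    · rfl
    · push_cast; ring

theorem oxFold_bridge (p2 : List Int) (cx2 : Int) {n : Nat} (hn : 0 < n) (copied : List Int) :
    ∀ (js : List Nat) (c : List (Option Int)) (p : Nat), c.length = n →
    js.foldl (fun st (k : Nat) => oxStepA p2 (n : Int) cx2 copied st (k : Int)) (c, cx2 + (p : Int))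
      = ((js.foldl (oxStepN p2 cx2 n copied) (c, p)).1,
         cx2 + ((js.foldl (oxStepN p2 cx2 n copied) (c, p)).2 : Int)) := by
  intro js
  induction js with
  | nil => intro c p _; simp
  | cons k js ih =>
    intro c p hc
    simp only [List.foldl_cons]
    rw [oxStepA_bridge p2 cx2 hn copied c hc p k]
    have hc' : (oxStepN p2 cx2 n copied (c, p) k).1.length = n := by
      by_cases hg : oxG p2 cx2 n k ∈ copied
      · simp [oxStepN, hg, hc]
      · simp [oxStepN, hg, hc]
    have := ih (oxStepN p2 cx2 n copied (c, p) k).1 (oxStepN p2 cx2 n copied (c, p) k).2 hc'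
    rw [this]

theorem oxInit_len (p1 : List Int) (cx1 cx2 : Int) :
    (oxInitChild p1 cx1 cx2).length = p1.length := by
  have h1 := PySem.List.clampIdx_le p1.length cx1
  have h2 := PySem.List.clampIdx_le p1.length cx2
  simp [oxInitChild, PySem.List.length_slice]
  omega

theorem oxInit_cnt (p1 : List Int) (cx1 cx2 : Int) :
    (oxInitChild p1 cx1 cx2).countP (fun v => v == none)
      = p1.length - (PySem.List.slice p1 (some cx1) (some cx2)).length := by
  have h1 := PySem.List.clampIdx_le p1.length cx1
  have h2 := PySem.List.clampIdx_le p1.length cx2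
  have h3 : (PySem.List.slice p1 (some cx1) (some cx2)).countP
      ((fun v => v == none) ∘ some) = 0 :=
    List.countP_eq_zero.mpr (fun a _ => by simp)
  simp only [oxInitChild, List.countP_append, List.countP_map, List.countP_replicate, h3,
    PySem.List.length_slice]
  simp
  omega

theorem cnt_getElem : ∀ (c : List (Option Int)),
    (List.range c.length).countP (fun i => getElem? c i == some none)
      = c.countP (fun v => v == none) := by
  intro c
  induction c with
  | nil => simp
  | cons x c ih =>
    rw [List.length_cons, List.range_succ_eq_map, List.countP_cons, List.countP_map]
    have h1 : (List.range c.length).countP ((fun i => getElem? (x :: c) i == some none) ∘ Nat.succ)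
        = (List.range c.length).countP (fun i => getElem? c i == some none) :=
      List.countP_congr (fun i _ => by simp)
    rw [h1, ih, List.countP_cons]
    simp

theorem countP_comp_oxR (cx2 : Int) {n : Nat} (hn : 0 < n) (P : Nat → Bool) :
    (List.range n).countP (fun k => P (oxR cx2 n k)) = (List.range n).countP P := by
  have hnd : ((List.range n).map (oxR cx2 n)).Nodup :=
    (List.nodup_map_iff_inj_on List.nodup_range).mpr
      (fun a ha b hb h => oxR_inj cx2 hn (List.mem_range.mp ha) (List.mem_range.mp hb) h)
  have hsub : ((List.range n).map (oxR cx2 n)) ⊆ List.range n := by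
    intro x hx
    obtain ⟨k, _, rfl⟩ := List.mem_map.mp hx
    exact List.mem_range.mpr (oxR_lt cx2 hn k)
  have hperm : ((List.range n).map (oxR cx2 n)).Perm (List.range n) :=
    (hnd.subperm hsub).perm_of_length_le (by simp)
  calc (List.range n).countP (fun k => P (oxR cx2 n k))
      = ((List.range n).map (oxR cx2 n)).countP P := (List.countP_map).symm
    _ = (List.range n).countP P := hperm.countP_eq P

theorem oxEmp_len (cx2 : Int) {n : Nat} (hn : 0 < n) (c : List (Option Int)) (hc : c.length = n) :
    (oxEmp cx2 n c).length = c.countP (fun v => v == none) := by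
  unfold oxEmp
  rw [← List.countP_eq_length_filter]
  have h2 := countP_comp_oxR cx2 hn (fun i => getElem? c i == some none)
  have h1 : (List.range n).countP (fun e => !oxFull cx2 n c e)
      = (List.range n).countP (fun e => getElem? c (oxR cx2 n e) == some none) :=
    List.countP_congr (fun e _ => by simp [oxFull])
  rw [h1, h2, ← hc, cnt_getElem]

theorem oxG_eq (p2 : List Int) (cx2 : Int) {n : Nat} (hn : 0 < n) (k : Nat) :
    oxG p2 cx2 n k = p2.getD (oxR cx2 n k) 0 := by
  unfold oxG
  rw [← oxR_cast cx2 hn k, PySem.List.pyGetD_natCast]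

theorem pre_count (p1 p2 : List Int) (cx1 cx2 : Int) (hn : 0 < p1.length) :
    (List.range p1.length).countP (fun k =>
        !decide (oxG p2 cx2 p1.length k
          ∈ PySem.Set.ofList (PySem.List.slice p1 (some cx1) (some cx2))))
      = (List.range p1.length).countP (fun i =>
          decide (p2.getD i 0 ∉ PySem.List.slice p1 (some cx1) (some cx2))) := by
  have h2 := countP_comp_oxR cx2 hn
    (fun i => decide (p2.getD i 0 ∉ PySem.List.slice p1 (some cx1) (some cx2)))
  have h1 : (List.range p1.length).countP (fun k =>
        !decide (oxG p2 cx2 p1.length k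
          ∈ PySem.Set.ofList (PySem.List.slice p1 (some cx1) (some cx2))))
      = (List.range p1.length).countP (fun k =>
          decide (p2.getD (oxR cx2 p1.length k) 0 ∉ PySem.List.slice p1 (some cx1) (some cx2))) :=
    List.countP_congr (fun k _ => by
      rw [oxG_eq p2 cx2 hn k]
      simp [PySem.Set.mem_ofList])
  rw [h1, h2]

theorem a_to_N (p1 p2 : List Int) (cx1 cx2 : Int) (hn : 0 < p1.length) :
    ox_crossover_py p1 p2 cx1 cx2
      = ((List.range p1.length).foldl
          (oxStepN p2 cx2 p1.length
            (PySem.Set.ofList (PySem.List.slice p1 (some cx1) (some cx2))))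
          (oxInitChild p1 cx1 cx2, 0)).1 := by
  have hA : ox_crossover_py p1 p2 cx1 cx2
      = ((PySem.List.pyRange 0 (p1.length : Int) 1).foldl
          (oxStepA p2 (p1.length : Int) cx2
            (PySem.Set.ofList (PySem.List.slice p1 (some cx1) (some cx2))))
          (oxInitChild p1 cx1 cx2, cx2)).1 := rfl
  rw [hA, PySem.List.pyRange_zero_nat, List.foldl_map]
  have hb := oxFold_bridge p2 cx2 hn
    (PySem.Set.ofList (PySem.List.slice p1 (some cx1) (some cx2)))
    (List.range p1.length) (oxInitChild p1 cx1 cx2) 0 (oxInit_len p1 cx1 cx2)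
  simp only [Nat.cast_zero, add_zero] at hb
  rw [hb]

-- ===== new B-side lemmas: the arithmetic two-list form equals the oxZip form =====

-- `start` as a Nat, and oxR as plain Nat modular arithmetic
theorem ox_start_lt (cx2 : Int) {n : Nat} (hn : 0 < n) :
    (PySem.Int.mod cx2 (n : Int)).toNat < n := by
  have h1 := PySem.Int.mod_nonneg cx2 (b := (n : Int)) (by exact_mod_cast hn)
  have h2 := PySem.Int.mod_lt cx2 (b := (n : Int)) (by exact_mod_cast hn)
  omega

theorem oxR_mod (cx2 : Int) {n : Nat} (hn : 0 < n) (k : Nat) (_hk : k < n) :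
    oxR cx2 n k = ((PySem.Int.mod cx2 (n : Int)).toNat + k) % n := by
  have hn' : (0 : Int) < n := by exact_mod_cast hn
  have h1 := PySem.Int.mod_nonneg cx2 hn'
  have h2 := PySem.Int.mod_lt cx2 hn'
  set s := (PySem.Int.mod cx2 (n : Int)).toNat with hs
  have hsval : PySem.Int.mod cx2 (n : Int) = (s : Int) := by omega
  have hcx : cx2 % (n : Int) = (s : Int) := by
    rw [← PySem.Int.mod_eq_emod_of_pos hn']; exact hsval
  have hmod : PySem.Int.mod (cx2 + k) (n : Int) = (((s + k) % n : Nat) : Int) := by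
    rw [PySem.Int.mod_eq_emod_of_pos hn']
    have hse : (s : Int) % n = (s : Int) := Int.emod_eq_of_lt (by omega) (by omega)
    calc (cx2 + (k : Int)) % n = (cx2 % n + (k : Int) % n) % n := Int.add_emod _ _ _
      _ = ((s : Int) % n + (k : Int) % n) % n := by rw [hcx, hse]
      _ = ((s : Int) + (k : Int)) % n := (Int.add_emod _ _ _).symm
      _ = (((s + k) % n : Nat) : Int) := by push_cast; ring
  unfold oxR
  rw [hmod]
  omega

-- the offset→index map enumerates the indices in wrap order: start, …, n-1, 0, …, start-1
theorem oxR_range (cx2 : Int) {n : Nat} (hn : 0 < n) :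
    (List.range n).map (oxR cx2 n)
      = List.range' (PySem.Int.mod cx2 (n : Int)).toNat (n - (PySem.Int.mod cx2 (n : Int)).toNat)
        ++ List.range (PySem.Int.mod cx2 (n : Int)).toNat := by
  set s := (PySem.Int.mod cx2 (n : Int)).toNat with hs
  have hsn : s < n := ox_start_lt cx2 hn
  apply List.ext_getElem
  · simp; omega
  · intro k hk1 hk2
    simp only [List.getElem_map, List.getElem_range] at *
    have hklt : k < n := by simpa using hk1
    rw [oxR_mod cx2 hn k hklt, ← hs]
    by_cases hcase : k < n - s
    · rw [List.getElem_append_left (by simpa using hcase)]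
      rw [List.getElem_range']
      rw [Nat.mod_eq_of_lt (by omega)]
      ring
    · rw [List.getElem_append_right (by simpa using hcase)]
      rw [List.getElem_range]
      have h2 : (s + k) % n = s + k - n := by
        rw [Nat.mod_eq_sub_mod (by omega)]
        exact Nat.mod_eq_of_lt (by omega)
      rw [h2]
      simp only [List.length_range']
      omega

-- the rotated gene list equals the offset-ordered gene list (needs n ≤ len p2)
theorem ox_rot_eq (p2 : List Int) (cx2 : Int) {n : Nat} (hn : 0 < n) (hlen : n ≤ p2.length) :
    (p2.drop (PySem.Int.mod cx2 (n : Int)).toNat).take (n - (PySem.Int.mod cx2 (n : Int)).toNat)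
        ++ p2.take (PySem.Int.mod cx2 (n : Int)).toNat
      = (List.range n).map (oxG p2 cx2 n) := by
  set s := (PySem.Int.mod cx2 (n : Int)).toNat with hs
  have hsn : s < n := ox_start_lt cx2 hn
  have hG : ∀ k, k < n → oxG p2 cx2 n k = p2.getD ((s + k) % n) 0 := by
    intro k hk
    rw [oxG_eq p2 cx2 hn k, oxR_mod cx2 hn k hk]
  have hlen1 : ((p2.drop s).take (n - s)).length = n - s := by simp; omega
  apply List.ext_getElem
  · simp; omega
  · intro k hk1 hk2
    have hklt : k < n := by simpa using hk2
    rw [List.getElem_map, List.getElem_range, hG k hklt]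
    by_cases hcase : k < n - s
    · rw [List.getElem_append_left (by rw [hlen1]; omega)]
      rw [Nat.mod_eq_of_lt (by omega), List.getD_eq_getElem _ _ (by omega)]
      rw [List.getElem_take, List.getElem_drop]
    · rw [List.getElem_append_right (by rw [hlen1]; omega)]
      have h2 : (s + k) % n = s + k - n := by
        rw [Nat.mod_eq_sub_mod (by omega)]
        exact Nat.mod_eq_of_lt (by omega)
      rw [h2, List.getD_eq_getElem _ _ (by omega)]
      rw [List.getElem_take]
      congr 1
      rw [hlen1]
      omega

-- the oxRem filterMap is the filter of the offset-ordered gene list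
theorem ox_rem_filter (p2 : List Int) (cx2 : Int) (n : Nat) (copied : List Int) (js : List Nat) :
    oxRem p2 cx2 n copied js
      = (js.map (oxG p2 cx2 n)).filter (fun g => !decide (g ∈ copied)) := by
  induction js with
  | nil => rfl
  | cons k js ih =>
    unfold oxRem at ih ⊢
    rw [List.filterMap_cons, List.map_cons, List.filter_cons]
    by_cases hg : oxG p2 cx2 n k ∈ copied
    · simp [hg, ih]
    · simp [hg, ih]

-- pointwise description of the initial child: segment values inside [lo, hi), none outside
theorem oxInit_get (p1 : List Int) (cx1 cx2 : Int) (j : Nat) (hj : j < p1.length) :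
    getElem? (oxInitChild p1 cx1 cx2) j
      = some (if PySem.List.clampIdx p1.length cx1 ≤ j
                ∧ j < max (PySem.List.clampIdx p1.length cx1) (PySem.List.clampIdx p1.length cx2)
              then some (p1.getD j 0) else none) := by
  set n := p1.length with hn
  set lo := PySem.List.clampIdx n cx1 with hlo
  set b := PySem.List.clampIdx n cx2 with hb
  have h1 : lo ≤ n := PySem.List.clampIdx_le n cx1
  have h2 : b ≤ n := PySem.List.clampIdx_le n cx2
  have hseg : PySem.List.slice p1 (some cx1) (some cx2) = (p1.drop lo).take (b - lo) := by
    simp only [PySem.List.slice]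
    rfl
  have hseglen : (PySem.List.slice p1 (some cx1) (some cx2)).length = b - lo := by
    rw [PySem.List.length_slice]
  unfold oxInitChild
  simp only [← hn, ← hlo, ← hb]
  by_cases hcase : lo ≤ j ∧ j < max lo b
  · rw [if_pos hcase]
    rw [List.getElem?_append_left (by simp [hseglen]; omega)]
    rw [List.getElem?_append_right (by simp; omega)]
    simp only [List.length_replicate]
    rw [List.getElem?_map, hseg]
    rw [List.getElem?_take, if_pos (by omega), List.getElem?_drop]
    have : lo + (j - lo) = j := by omega
    rw [this, List.getElem?_eq_getElem hj, List.getD_eq_getElem _ _ hj]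
    rfl
  · rw [if_neg hcase]
    by_cases hless : j < lo
    · rw [List.getElem?_append_left (by simp [hseglen]; omega)]
      rw [List.getElem?_append_left (by simpa using hless)]
      simp [hless]
    · rw [List.getElem?_append_right (by simp [hseglen]; omega)]
      rw [List.getElem?_replicate, if_pos (by simp [hseglen]; omega)]

-- indices untouched by the zip-fold keep their value
theorem foldl_set_get_notmem (pairs : List (Nat × Int)) (c : List (Option Int)) (i : Nat)
    (hni : ∀ p ∈ pairs, p.1 ≠ i) :
    getElem? (pairs.foldl (fun c pr => c.set pr.1 (some pr.2)) c) i = getElem? c i := by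
  induction pairs generalizing c with
  | nil => rfl
  | cons p ps ih =>
    rw [List.foldl_cons, ih _ (fun q hq => hni q (List.mem_cons_of_mem p hq))]
    exact List.getElem?_set_ne (hni p List.mem_cons_self)

-- pointwise description of the zip-fold over distinct in-range keys: first (= only) match wins
theorem foldl_set_get (pairs : List (Nat × Int)) (c : List (Option Int)) (i : Nat)
    (hnd : (pairs.map Prod.fst).Nodup) (hlt : ∀ p ∈ pairs, p.1 < c.length) :
    getElem? (pairs.foldl (fun c pr => c.set pr.1 (some pr.2)) c) i
      = match pairs.find? (fun pr => pr.1 == i) with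
        | some pr => some (some pr.2)
        | none => getElem? c i := by
  induction pairs generalizing c with
  | nil => rfl
  | cons p ps ih =>
    have hnd' : p.1 ∉ ps.map Prod.fst ∧ (ps.map Prod.fst).Nodup := by
      rw [List.map_cons, List.nodup_cons] at hnd
      exact hnd
    rw [List.foldl_cons, List.find?_cons]
    by_cases hpi : p.1 = i
    · have hbeq : (p.1 == i) = true := by simp [hpi]
      rw [hbeq]
      have hni : ∀ q ∈ ps, q.1 ≠ i := by
        intro q hq hqi
        apply hnd'.1
        rw [hpi, ← hqi]
        exact List.mem_map_of_mem hq
      rw [foldl_set_get_notmem ps _ i hni]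
      rw [← hpi]
      exact List.getElem?_set_self (hlt p List.mem_cons_self)
    · have hbeq : (p.1 == i) = false := by simp [hpi]
      rw [hbeq]
      have := ih (c.set p.1 (some p.2)) hnd'.2
        (fun q hq => by rw [List.length_set]; exact hlt q (List.mem_cons_of_mem p hq))
      rw [this]
      cases ps.find? (fun pr => pr.1 == i) with
      | some pr => rfl
      | none => exact List.getElem?_set_ne hpi

theorem foldl_set_length (pairs : List (Nat × Int)) (c : List (Option Int)) :
    (pairs.foldl (fun c pr => c.set pr.1 (some pr.2)) c).length = c.length := by
  induction pairs generalizing c with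
  | nil => rfl
  | cons p ps ih => rw [List.foldl_cons, ih, List.length_set]

-- B's port equals the oxZip form that A was reduced to
theorem alt_to_Zip (p1 p2 : List Int) (cx1 cx2 : Int) (hn : 0 < p1.length)
    (hlen : p1.length ≤ p2.length) :
    ox_crossover_py_alt p1 p2 cx1 cx2
      = oxZip cx2 p1.length (oxInitChild p1 cx1 cx2)
          (oxEmp cx2 p1.length (oxInitChild p1 cx1 cx2))
          (oxRem p2 cx2 p1.length
            (PySem.Set.ofList (PySem.List.slice p1 (some cx1) (some cx2)))
            (List.range p1.length)) := by
  set n := p1.length with hnn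
  set lo := PySem.List.clampIdx n cx1 with hlo
  set b := PySem.List.clampIdx n cx2 with hbb
  set hi := max lo b with hhi
  set s := (PySem.Int.mod cx2 (n : Int)).toNat with hss
  set c0 := oxInitChild p1 cx1 cx2 with hc0
  have hc0len : c0.length = n := oxInit_len p1 cx1 cx2
  have hsn : s < n := ox_start_lt cx2 hn
  set copied := PySem.Set.ofList (PySem.List.slice p1 (some cx1) (some cx2)) with hcop
  -- B's copied set is the same set: parent1[lo:hi] = slice p1 cx1 cx2
  have hseg : (p1.drop lo).take (hi - lo) = PySem.List.slice p1 (some cx1) (some cx2) := by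
    simp only [PySem.List.slice, ← hnn, ← hlo, ← hbb]
    by_cases hcase : lo ≤ b
    · have : hi = b := by omega
      rw [this]
    · have h1 : hi - lo = 0 := by omega
      have h2 : b - lo = 0 := by omega
      rw [h1, h2]
  -- B's genes list = oxRem over range n
  have hgenes :
      (((p2.drop s).take (n - s) ++ p2.take s).filter (fun g => !decide (g ∈ copied)))
        = oxRem p2 cx2 n copied (List.range n) := by
    rw [ox_rot_eq p2 cx2 hn hlen, ox_rem_filter]
  -- B's slots list = (oxEmp …).map oxR
  have hPQ : ∀ k ∈ List.range n,
      (!oxFull cx2 n c0 k)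
        = ((fun j => !(decide (lo ≤ j) && decide (j < hi))) ∘ (oxR cx2 n)) k := by
    intro k hk
    have hjlt : oxR cx2 n k < n := oxR_lt cx2 hn k
    have := oxInit_get p1 cx1 cx2 (oxR cx2 n k) (by omega)
    simp only [← hnn, ← hlo, ← hbb, ← hhi] at this
    simp only [Function.comp, oxFull, ← hc0] at *
    rw [this]
    by_cases hcase : lo ≤ oxR cx2 n k ∧ oxR cx2 n k < hi
    · rw [if_pos hcase]
      simp [hcase.1, hcase.2]
    · rw [if_neg hcase]
      rcases Decidable.not_and_iff_not_or_not.mp hcase with h | h <;> simp [h]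
  have hslots :
      ((List.range' s (n - s)).filter (fun i => !(decide (lo ≤ i) && decide (i < hi)))
        ++ (List.range s).filter (fun i => !(decide (lo ≤ i) && decide (i < hi))))
      = (oxEmp cx2 n c0).map (oxR cx2 n) := by
    unfold oxEmp
    rw [List.filter_congr hPQ, ← List.filter_map, oxR_range cx2 hn, List.filter_append]
  -- now compare pointwise
  set es := oxEmp cx2 n c0 with hes
  set gs := oxRem p2 cx2 n copied (List.range n) with hgs
  set pairs := (es.zip gs).map (fun pr => (oxR cx2 n pr.1, pr.2)) with hpairs
  have hfold : oxZip cx2 n c0 es gs = pairs.foldl (fun c pr => c.set pr.1 (some pr.2)) c0 := by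
    unfold oxZip
    rw [hpairs, List.foldl_map]
  have heslt : ∀ e ∈ es, e < n := by
    intro e he
    exact List.mem_range.mp (List.mem_filter.mp he).1
  have hesnd : es.Nodup := List.Nodup.filter _ List.nodup_range
  have hkeys : (pairs.map Prod.fst).Nodup := by
    rw [hpairs, List.map_map]
    have : (Prod.fst ∘ fun pr : Nat × Int => (oxR cx2 n pr.1, pr.2)) = (oxR cx2 n) ∘ Prod.fst := rfl
    rw [this, ← List.map_map]
    apply (List.nodup_map_iff_inj_on ?_).mpr
    · intro a ha b hb hab
      have ha' : a < n := by
        obtain ⟨pr, hpr, rfl⟩ := List.mem_map.mp ha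
        exact heslt pr.1 (List.of_mem_zip hpr).1
      have hb' : b < n := by
        obtain ⟨pr, hpr, rfl⟩ := List.mem_map.mp hb
        exact heslt pr.1 (List.of_mem_zip hpr).1
      exact oxR_inj cx2 hn ha' hb' hab
    · have hfst : (es.zip gs).map Prod.fst = es.take (min es.length gs.length) := by
        rw [List.zip_eq_zip_take_min, List.map_fst_zip] ; simp
      rw [hfst]
      exact hesnd.sublist (List.take_sublist _ _)
  have hplt : ∀ p ∈ pairs, p.1 < c0.length := by
    intro p hp
    obtain ⟨pr, _, rfl⟩ := List.mem_map.mp hp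
    rw [hc0len]
    exact oxR_lt cx2 hn pr.1
  -- keys of pairs are empty slots: never inside [lo, hi)
  have hkey_out : ∀ p ∈ pairs, ¬ (lo ≤ p.1 ∧ p.1 < hi) := by
    intro p hp
    obtain ⟨pr, hpr, rfl⟩ := List.mem_map.mp hp
    have hmem : pr.1 ∈ es := (List.of_mem_zip hpr).1
    have h2 := (List.mem_filter.mp hmem).2
    rw [hPQ pr.1 (List.mem_filter.mp hmem).1] at h2
    simp only [Function.comp] at h2
    intro hcon
    simp [hcon.1, hcon.2] at h2
  -- the dict built from slots.zip genes answers find? on pairs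
  have hdict : ∀ i : Nat,
      (PySem.Dict.ofList ((((List.range' s (n - s)).filter (fun i => !(decide (lo ≤ i) && decide (i < hi))))
        ++ ((List.range s).filter (fun i => !(decide (lo ≤ i) && decide (i < hi))))).zip
          ((((p2.drop s).take (n - s) ++ p2.take s).filter (fun g => !decide (g ∈ copied)))))).get? i
      = (pairs.find? (fun pr => pr.1 == i)).map Prod.snd := by
    intro i
    have hz : ((((List.range' s (n - s)).filter (fun i => !(decide (lo ≤ i) && decide (i < hi))))
        ++ ((List.range s).filter (fun i => !(decide (lo ≤ i) && decide (i < hi))))).zip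
          ((((p2.drop s).take (n - s) ++ p2.take s).filter (fun g => !decide (g ∈ copied)))))
        = pairs := by
      rw [hslots, hgenes, List.zip_map_left]
      rfl
    rw [hz]
    have hitems : (PySem.Dict.ofList pairs).items = pairs := by
      show (PySem.Dict.empty.update pairs).items = pairs
      unfold PySem.Dict.update
      have := PySem.Dict.items_foldl_insert_fresh pairs Prod.fst Prod.snd PySem.Dict.empty
        (fun a _ => by simp [pysem]) hkeys
      simpa using this
    show ((PySem.Dict.ofList pairs).items.find? (fun p => p.1 == i)).map Prod.snd = _
    rw [hitems]
  -- final pointwise equality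
  have hBlen : (ox_crossover_py_alt p1 p2 cx1 cx2).length = n := by
    unfold ox_crossover_py_alt
    rw [if_neg (by omega)]
    simp [← hnn]
  apply List.ext_getElem
  · rw [hBlen, hfold, foldl_set_length, hc0len]
  · intro i hi1 hi2
    rw [← Option.some_inj, ← List.getElem?_eq_getElem, ← List.getElem?_eq_getElem]
    have hin : i < n := by omega
    have hB : getElem? (ox_crossover_py_alt p1 p2 cx1 cx2) i
        = some (if lo ≤ i ∧ i < hi then some (p1.getD i 0)
            else (pairs.find? (fun pr => pr.1 == i)).map Prod.snd) := by
      unfold ox_crossover_py_alt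
      rw [if_neg (by omega)]
      simp only [← hnn, ← hlo, ← hbb, ← hhi, ← hss]
      rw [hseg, ← hcop]
      rw [List.getElem?_map, List.getElem?_range hin]
      simp only [Option.map_some]
      congr 1
      by_cases hcase : lo ≤ i ∧ i < hi
      · rw [if_pos hcase, if_pos hcase]
      · rw [if_neg hcase, if_neg hcase, hdict i]
    rw [hB, hfold, foldl_set_get pairs c0 i hkeys hplt]
    cases hfind : pairs.find? (fun pr => pr.1 == i) with
    | some pr =>
      have hpri : pr.1 = i := by
        have := List.find?_some hfind
        simpa using this
      have hout := hkey_out pr (List.mem_of_find?_eq_some hfind)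
      rw [hpri] at hout
      rw [if_neg hout]
      simp
    | none =>
      have := oxInit_get p1 cx1 cx2 i (by omega)
      simp only [← hnn, ← hlo, ← hbb, ← hhi, ← hc0] at this
      rw [this]
      by_cases hcase : lo ≤ i ∧ i < hi
      · rw [if_pos hcase, if_pos hcase]
      · rw [if_neg hcase, if_neg hcase]
        simp

-- ===== VERDICT =====
theorem ox_crossover_py_spec : Claim_equal_ox_crossover_py := by
  intro p1 p2 cx1 cx2 _ hpre
  unfold Spec_ox_crossover_py
  rcases Nat.eq_zero_or_pos p1.length with h0 | hn
  · have hp : p1 = [] := List.eq_nil_iff_length_eq_zero.mpr h0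
    subst hp
    simp [ox_crossover_py, ox_crossover_py_alt]
    exact List.eq_nil_iff_length_eq_zero.mpr (by simp [oxInit_len])
  · rw [a_to_N p1 p2 cx1 cx2 hn, alt_to_Zip p1 p2 cx1 cx2 hn hpre.1]
    apply ox_main p2 cx2 hn _ (List.range p1.length) _ 0 (oxInit_len p1 cx1 cx2)
      (fun q hq => absurd hq (Nat.not_lt_zero q))
    rw [pre_count p1 p2 cx1 cx2 hn,
      oxEmp_len cx2 hn (oxInitChild p1 cx1 cx2) (oxInit_len p1 cx1 cx2), oxInit_cnt]
    exact hpre.2
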